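-- pv_equiv track=rewrite | github.com/vinchinzu/euler | python/080.py | digital_sum_for_sqrt
-- ===== SOURCE A (Python) =====
-- DIGITS = 100
--
-- SCALE = 10 ** DIGITS
--
-- def integer_sqrt(n):
--     """Integer square root using Newton's method."""
--     if n == 0:
--         return 0
--     x = n
--     y = (x + 1) // 2
--     while y < x:
--         x = y
--         y = (x + n // x) // 2
--     return x
--
-- def digital_sum_for_sqrt(n):
--     """Calculate digital sum of first DIGITS of sqrt(n), excluding perfect squares."""
--     root = integer_sqrt(n)
--     if root * root == n:  # skip perfect squares
--         return 0
--
--     scaled_root = integer_sqrt(n * SCALE * SCALE)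
--
--     integer_part = scaled_root // SCALE
--     fractional_part = scaled_root % SCALE
--
--     digits = str(integer_part) + str(fractional_part).rjust(DIGITS, '0')
--     total = 0
--     for ch in digits[:DIGITS]:
--         total += ord(ch) - 48  # Convert char to digit
--     return total
-- ===== SOURCE B (Python) =====
-- DIGITS = 100
--
-- def digital_sum_for_sqrt(n):
--     """Digit-by-digit (long division) square root: sum of the first DIGITS
--     decimal digits of sqrt(n); 0 for perfect squares (detected by a zero
--     remainder after the integer part, no separate isqrt needed)."""
--     if n < 0:
--         raise ValueError("math domain error")
--     # base-100 digits of n, most significant first (= decimal digit pairs)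
--     pairs = []
--     m = n
--     while m:
--         pairs.append(m % 100)
--         m //= 100
--     pairs.reverse()
--     if not pairs:
--         pairs = [0]
--     root = 0      # root built so far
--     rem = 0       # remainder: value-of-consumed-prefix - root*root
--     total = 0     # running digit sum (first DIGITS digits only)
--     emitted = 0
--     for p in pairs:
--         rem = rem * 100 + p
--         x = 9
--         while (20 * root + x) * x > rem:
--             x -= 1
--         rem -= (20 * root + x) * x
--         root = root * 10 + x
--         if emitted < DIGITS:
--             total += x
--         emitted += 1
--     if rem == 0:
--         return 0  # perfect square
--     while emitted < DIGITS:
--         rem = rem * 100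
--         x = 9
--         while (20 * root + x) * x > rem:
--             x -= 1
--         rem -= (20 * root + x) * x
--         root = root * 10 + x
--         total += x
--         emitted += 1
--     return total
-- ===== Notes on version B (the rewrite author's own statement) =====
-- stated objective: alternative
-- what changed: Replaces Newton's method on the scaled-up radicand plus decimal-string slicing by the classic digit-by-digit (long-division) square root: n's decimal digit pairs are processed with a running root and remainder, one digit emitted and summed per step, and a zero remainder after the integer part replaces the separate isqrt perfect-square check.
-- outside the precondition, e.g. on digital_sum_for_sqrt(-3): A returns 0, B raises ValueError
import Mathlib
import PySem

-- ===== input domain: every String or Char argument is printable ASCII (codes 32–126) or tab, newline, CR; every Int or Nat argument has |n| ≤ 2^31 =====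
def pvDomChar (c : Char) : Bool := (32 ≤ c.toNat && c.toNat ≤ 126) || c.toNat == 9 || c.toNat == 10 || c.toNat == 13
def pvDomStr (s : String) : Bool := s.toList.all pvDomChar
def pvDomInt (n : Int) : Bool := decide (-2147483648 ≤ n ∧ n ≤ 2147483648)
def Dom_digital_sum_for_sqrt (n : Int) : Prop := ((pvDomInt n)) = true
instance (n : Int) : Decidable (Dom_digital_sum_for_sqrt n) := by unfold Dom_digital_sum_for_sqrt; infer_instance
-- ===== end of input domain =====

-- B computes the same digit sum by the classic digit-by-digit (long-division) square
-- root — one decimal digit emitted and summed per step — instead of Newton's method on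
-- the scaled-up radicand plus decimal-string slicing (a different algorithm, similar cost).

-- ===== PORT A =====

-- SCALE = 10 ** DIGITS (DIGITS = 100)
def pvSCALE : Int := 10 ^ (100 : Nat)

-- 'while y < x:' of integer_sqrt; fuel only makes the recursion total (proved sufficient
-- for every call the port makes), the computation is Python's step for step
def pvIntegerSqrtLoop (fuel : Nat) (n x y : Int) : Int :=
  match fuel with
  | 0 => x
  | f + 1 =>
    if y < x then
      pvIntegerSqrtLoop f n y (PySem.Int.floordiv (y + PySem.Int.floordiv n y) 2)
    else x

def integer_sqrt (n : Int) : Int :=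
  if n = 0 then 0
  else pvIntegerSqrtLoop (n.toNat + 1) n n (PySem.Int.floordiv (n + 1) 2)

-- str.rjust(w, c): exact for Python's rjust (pads on the left, never truncates)
def pvRjust (s : List Char) (w : Nat) (c : Char) : List Char :=
  List.replicate (w - s.length) c ++ s

def digital_sum_for_sqrt (n : Int) : Int :=
  let root := integer_sqrt n
  if root * root = n then 0
  else
    let scaled_root := integer_sqrt (n * pvSCALE * pvSCALE)
    let integer_part := PySem.Int.floordiv scaled_root pvSCALE
    let fractional_part := PySem.Int.mod scaled_root pvSCALE
    let digits := PySem.Int.toChars integer_part ++ pvRjust (PySem.Int.toChars fractional_part) 100 '0'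
    (PySem.List.slice digits none (some 100)).foldl (fun total ch => total + ((ch.toNat : Int) - 48)) 0

-- ===== PORT B =====

-- 'while m: pairs.append(m % 100); m //= 100' (little-endian base-100 digits);
-- over Nat since B guards n < 0 with a raise before this loop runs
def pvPairsLE (m : Nat) : List Nat :=
  if m = 0 then [] else m % 100 :: pvPairsLE (m / 100)
decreasing_by exact Nat.div_lt_self (Nat.pos_of_ne_zero (by assumption)) (by norm_num)

-- 'x = 9; while (20*root + x)*x > rem: x -= 1'
def pvFindX (root rem : Nat) : Nat → Nat
  | 0 => 0
  | x + 1 => if (20 * root + (x + 1)) * (x + 1) > rem then pvFindX root rem x else x + 1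

-- body of 'for p in pairs:' over the state (root, rem, total, emitted)
def pvStep (st : Nat × Nat × Nat × Nat) (p : Nat) : Nat × Nat × Nat × Nat :=
  let rem1 := st.2.1 * 100 + p
  let x := pvFindX st.1 rem1 9
  (st.1 * 10 + x, rem1 - (20 * st.1 + x) * x,
   if st.2.2.2 < 100 then st.2.2.1 + x else st.2.2.1, st.2.2.2 + 1)

-- 'while emitted < DIGITS:' fractional-digit loop
def pvFracLoop (root rem total emitted : Nat) : Nat :=
  if emitted < 100 then
    let rem1 := rem * 100
    let x := pvFindX root rem1 9
    pvFracLoop (root * 10 + x) (rem1 - (20 * root + x) * x) (total + x) (emitted + 1)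
  else total
termination_by 100 - emitted
decreasing_by omega

def digital_sum_for_sqrt_alt (n : Int) : Int :=
  if n < 0 then 0  -- the Python B raises ValueError here; outside Pre_
  else
    let pairs0 := (pvPairsLE n.toNat).reverse
    let pairs := if pairs0 = [] then [0] else pairs0
    match pairs.foldl pvStep (0, 0, 0, 0) with
    | (root, rem, total, emitted) =>
      if rem = 0 then 0 else (pvFracLoop root rem total emitted : Int)

-- ===== PRECONDITION & SPEC =====
-- Pre_ excludes negative n, where A's Newton loop never runs and A returns the char-sum of
-- a textual '-'-signed pseudo-root (not a digit sum of anything); B raises ValueError there.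
def Pre_digital_sum_for_sqrt (n : Int) : Prop := 0 ≤ n
instance (n : Int) : Decidable (Pre_digital_sum_for_sqrt n) := by
  unfold Pre_digital_sum_for_sqrt; infer_instance

def pvWitness_digital_sum_for_sqrt : Int := 2

def Spec_digital_sum_for_sqrt (n : Int) (out : Int) : Prop := out = digital_sum_for_sqrt_alt n
instance (n : Int) (out : Int) : Decidable (Spec_digital_sum_for_sqrt n out) := by
  unfold Spec_digital_sum_for_sqrt; infer_instance

-- ===== CLAIM (what is proved, stated in full; the proofs are below) =====
def Claim_equal_digital_sum_for_sqrt : Prop :=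
  ∀ (n : Int), Dom_digital_sum_for_sqrt n → Pre_digital_sum_for_sqrt n →
    Spec_digital_sum_for_sqrt n (digital_sum_for_sqrt n)

-- ===== LEMMAS AND PROOFS =====

-- ---------- A side: the Newton loop computes Nat.sqrt ----------

theorem pv_newton_key (n x : Int) (hn : 1 ≤ n) (hx : 1 ≤ x) :
    ((Nat.sqrt n.toNat : Nat) : Int) ≤ PySem.Int.floordiv (x + PySem.Int.floordiv n x) 2 := by
  set s : Int := ((Nat.sqrt n.toNat : Nat) : Int) with hs
  have hs0 : 0 ≤ s := by positivity
  have hss : s * s ≤ n := by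
    have h := Nat.sqrt_le' n.toNat
    have : ((Nat.sqrt n.toNat ^ 2 : Nat) : Int) ≤ ((n.toNat : Nat) : Int) := by exact_mod_cast h
    rw [Int.toNat_of_nonneg (by omega)] at this
    push_cast at this
    nlinarith [this]
  rw [PySem.Int.le_floordiv_iff_mul_le (by norm_num : (0:Int) < 2)]
  have hx0 : 0 < x := by omega
  have h1 : PySem.Int.floordiv (s * s) x ≤ PySem.Int.floordiv n x := by
    rw [PySem.Int.floordiv_eq_ediv_of_pos hx0, PySem.Int.floordiv_eq_ediv_of_pos hx0]
    exact Int.ediv_le_ediv hx0 hss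
  have h2 : s * 2 - x ≤ PySem.Int.floordiv (s * s) x := by
    by_cases hc : s * 2 - x ≤ 0
    · have : 0 ≤ PySem.Int.floordiv (s * s) x := by
        rw [PySem.Int.floordiv_eq_ediv_of_pos hx0]
        exact Int.ediv_nonneg (by nlinarith) (by omega)
      omega
    · rw [PySem.Int.le_floordiv_iff_mul_le hx0]
      nlinarith [sq_nonneg (s - x)]
  omega

theorem pv_loop_eq (fuel : Nat) (n x : Int) (hn : 1 ≤ n)
    (hx : ((Nat.sqrt n.toNat : Nat) : Int) ≤ x) (hf : x.toNat ≤ fuel) :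
    pvIntegerSqrtLoop fuel n x (PySem.Int.floordiv (x + PySem.Int.floordiv n x) 2)
      = ((Nat.sqrt n.toNat : Nat) : Int) := by
  induction fuel generalizing x with
  | zero =>
    exfalso
    have hs1 : 1 ≤ Nat.sqrt n.toNat := by
      have : 0 < n.toNat := by omega
      exact (Nat.sqrt_pos).2 this
    omega
  | succ f ih =>
    have hs1 : 1 ≤ Nat.sqrt n.toNat := (Nat.sqrt_pos).2 (by omega)
    have hx1 : 1 ≤ x := by exact_mod_cast le_trans (by exact_mod_cast hs1) hx
    set y := PySem.Int.floordiv (x + PySem.Int.floordiv n x) 2 with hy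
    show pvIntegerSqrtLoop (f + 1) n x y = _
    rw [pvIntegerSqrtLoop]
    by_cases hyx : y < x
    · rw [if_pos hyx]
      have hsy : ((Nat.sqrt n.toNat : Nat) : Int) ≤ y := pv_newton_key n x hn hx1
      exact ih y hsy (by omega)
    · rw [if_neg hyx]
      -- x ≤ y forces x*x ≤ n, hence x = sqrt n
      have hxy : x ≤ y := by omega
      have h1 : x * 2 ≤ x + PySem.Int.floordiv n x := by
        rw [hy, PySem.Int.le_floordiv_iff_mul_le (by norm_num : (0:Int) < 2)] at hxy
        exact hxy
      have h2 : x ≤ PySem.Int.floordiv n x := by omega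
      have h3 : x * x ≤ n := by
        rw [PySem.Int.le_floordiv_iff_mul_le (by omega : (0:Int) < x)] at h2
        exact h2
      have h4 : x.toNat ≤ Nat.sqrt n.toNat := by
        rw [Nat.le_sqrt]
        have : ((x.toNat * x.toNat : Nat) : Int) ≤ ((n.toNat : Nat) : Int) := by
          push_cast
          rw [Int.toNat_of_nonneg (by omega : (0:Int) ≤ x), Int.toNat_of_nonneg (by omega : (0:Int) ≤ n)]
          exact h3
        exact_mod_cast this
      omega

theorem pv_integer_sqrt_eq (n : Int) (hn : 0 ≤ n) :
    integer_sqrt n = ((Nat.sqrt n.toNat : Nat) : Int) := by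
  rcases eq_or_lt_of_le hn with h0 | h1
  · rw [integer_sqrt, if_pos h0.symm, ← h0]
    simp
  · rw [integer_sqrt, if_neg (by omega)]
    have hdd : PySem.Int.floordiv n n = 1 := by
      rw [(PySem.Int.floordiv_eq_iff_of_pos (by omega : (0:Int) < n))]
      constructor <;> nlinarith
    have : PySem.Int.floordiv (n + 1) 2 = PySem.Int.floordiv (n + PySem.Int.floordiv n n) 2 := by
      rw [hdd]
    rw [this]
    apply pv_loop_eq _ _ _ (by omega)
    · calc ((Nat.sqrt n.toNat : Nat) : Int) ≤ (n.toNat : Int) := by exact_mod_cast Nat.sqrt_le_self n.toNat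
        _ = n := Int.toNat_of_nonneg hn
    · omega

-- ---------- decimal digits of Nat, via Nat.digits ----------

theorem pv_toDigitsCore_eq (fuel : Nat) : ∀ (n : Nat) (ds : List Char), 0 < n → n ≤ fuel →
    Nat.toDigitsCore 10 fuel n ds = ((Nat.digits 10 n).map Nat.digitChar).reverse ++ ds := by
  induction fuel with
  | zero => intro n ds h1 h2; omega
  | succ f ih =>
    intro n ds h1 h2
    rw [Nat.toDigitsCore]
    rw [Nat.digits_def' (by norm_num : (1:Nat) < 10) h1]
    by_cases h : n / 10 = 0
    · simp only [h, if_pos]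
      simp
    · simp only [h, ite_false]
      rw [ih (n / 10) _ (by omega) (by omega)]
      simp

theorem pv_toChars_natCast (m : Nat) (hm : 0 < m) :
    PySem.Int.toChars (m : Int) = ((Nat.digits 10 m).map Nat.digitChar).reverse := by
  rw [PySem.Int.toChars]
  rw [if_neg (by exact_mod_cast Int.not_lt.2 (Int.natCast_nonneg m))]
  have : ((m : Int)).toNat = m := by omega
  rw [this, Nat.toDigits, pv_toDigitsCore_eq (m + 1) m [] hm (by omega)]
  simp

theorem pv_digitChar_val {d : Nat} (h : d < 10) :
    ((Nat.digitChar d).toNat : Int) - 48 = (d : Int) := by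
  interval_cases d <;> decide

theorem pv_charsum_aux (L : List Nat) (hL : ∀ d ∈ L, d < 10) :
    (L.map (fun d => (((Nat.digitChar d).toNat : Int) - 48))).sum = ((L.sum : Nat) : Int) := by
  induction L with
  | nil => simp
  | cons a l ih =>
    simp only [List.map_cons, List.sum_cons, Nat.cast_add]
    rw [ih (fun d hd => hL d (List.mem_cons_of_mem a hd)), pv_digitChar_val (hL a List.mem_cons_self)]

theorem pv_charsum (m : Nat) :
    ((((Nat.digits 10 m).map Nat.digitChar).reverse).map (fun ch => ((ch.toNat : Int) - 48))).sum
      = (((Nat.digits 10 m).sum : Nat) : Int) := by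
  rw [List.map_reverse, List.sum_reverse, List.map_map]
  exact pv_charsum_aux (Nat.digits 10 m) (fun d hd => Nat.digits_lt_base (by norm_num) hd)

theorem pv_len_digits_le (m k : Nat) (h : m < 10 ^ k) : (Nat.digits 10 m).length ≤ k := by
  rcases Nat.eq_zero_or_pos m with rfl | hm
  · simp
  · rw [Nat.length_digits 10 m (by norm_num) (by omega)]
    have : Nat.log 10 m < k := Nat.log_lt_of_lt_pow (by omega) h
    omega

theorem pv_digits_drop (d : Nat) : ∀ m : Nat, (Nat.digits 10 m).drop d = Nat.digits 10 (m / 10 ^ d) := by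
  induction d with
  | zero => intro m; simp
  | succ d ih =>
    intro m
    rcases Nat.eq_zero_or_pos m with rfl | hm
    · simp
    · rw [Nat.digits_def' (by norm_num : (1:Nat) < 10) hm]
      have : (Nat.digits 10 (m / 10) ).drop d = Nat.digits 10 ((m / 10) / 10 ^ d) := ih (m / 10)
      rw [List.drop_succ_cons, this, Nat.div_div_eq_div_mul, pow_succ]
      ring_nf

theorem pv_sqrt_div (m t : Nat) (ht : 0 < t) : Nat.sqrt m / t = Nat.sqrt (m / (t * t)) := by
  apply le_antisymm
  · rw [Nat.le_sqrt]
    rw [Nat.le_div_iff_mul_le (by positivity : 0 < t * t)]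
    have h1 : Nat.sqrt m / t * t ≤ Nat.sqrt m := Nat.div_mul_le_self _ _
    calc Nat.sqrt m / t * (Nat.sqrt m / t) * (t * t)
        = (Nat.sqrt m / t * t) * (Nat.sqrt m / t * t) := by ring
      _ ≤ Nat.sqrt m * Nat.sqrt m := Nat.mul_le_mul h1 h1
      _ ≤ m := Nat.sqrt_le m
  · rw [Nat.le_div_iff_mul_le ht, Nat.le_sqrt]
    have h1 : Nat.sqrt (m / (t * t)) * Nat.sqrt (m / (t * t)) ≤ m / (t * t) := Nat.sqrt_le _
    rw [Nat.le_div_iff_mul_le (by positivity : 0 < t * t)] at h1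
    calc Nat.sqrt (m / (t * t)) * t * (Nat.sqrt (m / (t * t)) * t)
        = Nat.sqrt (m / (t * t)) * Nat.sqrt (m / (t * t)) * (t * t) := by ring
      _ ≤ m := h1

-- ---------- B side: long-division invariant ----------

def pvVal (V : Nat) (P : List Nat) : Nat := P.foldl (fun v p => v * 100 + p) V

theorem pv_pairsLE_eq (m : Nat) : pvPairsLE m = Nat.digits 100 m := by
  induction m using Nat.strong_induction_on with
  | _ m ih =>
    rw [pvPairsLE]
    rcases Nat.eq_zero_or_pos m with rfl | hm
    · simp
    · rw [if_neg (by omega), Nat.digits_def' (by norm_num : (1:Nat) < 100) hm,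
          ih (m / 100) (Nat.div_lt_self hm (by norm_num))]

theorem pv_val_append (P : List Nat) : ∀ V : Nat,
    pvVal V P = V * 100 ^ P.length + Nat.ofDigits 100 P.reverse := by
  induction P with
  | nil => intro V; simp [pvVal]
  | cons p P ih =>
    intro V
    have h1 : pvVal V (p :: P) = pvVal (V * 100 + p) P := rfl
    rw [h1, ih]
    simp only [List.reverse_cons, Nat.ofDigits_append, List.length_reverse, List.length_cons]
    rw [Nat.ofDigits_singleton]
    ring

theorem pv_val_digits (m : Nat) : pvVal 0 ((Nat.digits 100 m).reverse) = m := by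
  rw [pv_val_append, List.reverse_reverse, Nat.ofDigits_digits]
  simp

theorem pv_findX_le (root rem : Nat) : ∀ k, pvFindX root rem k ≤ k := by
  intro k
  induction k with
  | zero => simp [pvFindX]
  | succ x ih =>
    rw [pvFindX]
    split
    · omega
    · omega

theorem pv_findX_sound (root rem : Nat) : ∀ k,
    (20 * root + pvFindX root rem k) * pvFindX root rem k ≤ rem := by
  intro k
  induction k with
  | zero => simp [pvFindX]
  | succ x ih =>
    rw [pvFindX]
    split
    · exact ih
    · omega

theorem pv_findX_max (root rem : Nat) : ∀ k x, x ≤ k →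
    (20 * root + x) * x ≤ rem → x ≤ pvFindX root rem k := by
  intro k
  induction k with
  | zero => intro x hx _; omega
  | succ k ih =>
    intro x hx hle
    rw [pvFindX]
    split
    · rename_i hcond
      refine ih x ?_ hle
      rcases Nat.lt_or_ge x (k + 1) with h | h
      · omega
      · exfalso
        have hxe : x = k + 1 := by omega
        rw [hxe] at hle
        omega
    · omega

theorem pv_sqrt_step (V p : Nat) (hp : p < 100) :
    Nat.sqrt (V * 100 + p)
      = 10 * Nat.sqrt V + pvFindX (Nat.sqrt V) ((V - Nat.sqrt V * Nat.sqrt V) * 100 + p) 9 := by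
  set s := Nat.sqrt V with hs
  set rem := (V - s * s) * 100 + p with hrem
  set g := pvFindX s rem 9 with hg
  have hsle : s * s ≤ V := Nat.sqrt_le V
  have hslt : V < (s + 1) * (s + 1) := Nat.lt_succ_sqrt V
  have hg9 : g ≤ 9 := pv_findX_le s rem 9
  have hsound : (20 * s + g) * g ≤ rem := pv_findX_sound s rem 9
  have elow : (10 * s + g) * (10 * s + g) = 100 * (s * s) + (20 * s + g) * g := by ring
  have hlow : (10 * s + g) * (10 * s + g) ≤ V * 100 + p := by omega
  have hhigh : V * 100 + p < (10 * s + g + 1) * (10 * s + g + 1) := by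
    rcases Nat.lt_or_ge g 9 with h9 | h9
    · have hnot : ¬ ((20 * s + (g + 1)) * (g + 1) ≤ rem) := by
        intro hcon
        have := pv_findX_max s rem 9 (g + 1) (by omega) hcon
        omega
      have e2 : (10 * s + g + 1) * (10 * s + g + 1) = 100 * (s * s) + (20 * s + (g + 1)) * (g + 1) := by ring
      omega
    · have hge : g = 9 := by omega
      have e3 : (10 * s + g + 1) * (10 * s + g + 1) = 100 * ((s + 1) * (s + 1)) := by
        rw [hge]; ring
      omega
  have h1 : 10 * s + g ≤ Nat.sqrt (V * 100 + p) := Nat.le_sqrt.2 hlow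
  have h2 : Nat.sqrt (V * 100 + p) < 10 * s + g + 1 := Nat.sqrt_lt.2 hhigh
  omega

theorem pv_digitSum_10mul_add (r x : Nat) (hx : x < 10) :
    (Nat.digits 10 (10 * r + x)).sum = (Nat.digits 10 r).sum + x := by
  rcases Nat.eq_zero_or_pos (10 * r + x) with h0 | hpos
  · have hr : r = 0 := by omega
    have hx0 : x = 0 := by omega
    subst hr; subst hx0; simp
  · rw [Nat.digits_def' (by norm_num : (1:Nat) < 10) hpos]
    have hmod : (10 * r + x) % 10 = x := by omega
    have hdiv : (10 * r + x) / 10 = r := by omega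
    rw [hmod, hdiv, List.sum_cons]
    omega

theorem pv_step_spec (V p t e : Nat) (hp : p < 100) :
    pvStep (Nat.sqrt V, V - Nat.sqrt V * Nat.sqrt V, t, e) p
      = (Nat.sqrt (V * 100 + p),
         (V * 100 + p) - Nat.sqrt (V * 100 + p) * Nat.sqrt (V * 100 + p),
         if e < 100 then t + (Nat.sqrt (V * 100 + p) - 10 * Nat.sqrt V) else t,
         e + 1) := by
  have hsle : Nat.sqrt V * Nat.sqrt V ≤ V := Nat.sqrt_le V
  have hstep := pv_sqrt_step V p hp
  set s := Nat.sqrt V with hs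
  set g := pvFindX s ((V - s * s) * 100 + p) 9 with hg
  have hsound : (20 * s + g) * g ≤ (V - s * s) * 100 + p := pv_findX_sound s _ 9
  have elow : (10 * s + g) * (10 * s + g) = 100 * (s * s) + (20 * s + g) * g := by ring
  show (s * 10 + g, (V - s * s) * 100 + p - (20 * s + g) * g,
        if e < 100 then t + g else t, e + 1) = _
  refine Prod.ext ?_ (Prod.ext ?_ (Prod.ext ?_ rfl))
  · show s * 10 + g = Nat.sqrt (V * 100 + p)
    omega
  · show (V - s * s) * 100 + p - (20 * s + g) * g
        = (V * 100 + p) - Nat.sqrt (V * 100 + p) * Nat.sqrt (V * 100 + p)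
    rw [hstep]
    have e2 : (10 * s + g) * (10 * s + g) = 100 * (s * s) + (20 * s + g) * g := elow
    omega
  · show (if e < 100 then t + g else t)
        = if e < 100 then t + (Nat.sqrt (V * 100 + p) - 10 * s) else t
    have hgg : Nat.sqrt (V * 100 + p) - 10 * s = g := by omega
    rw [hgg]

theorem pv_fold_char (P : List Nat) : ∀ (V e : Nat), (∀ p ∈ P, p < 100) → e + P.length ≤ 100 →
    P.foldl pvStep (Nat.sqrt V, V - Nat.sqrt V * Nat.sqrt V, (Nat.digits 10 (Nat.sqrt V)).sum, e)
      = (Nat.sqrt (pvVal V P),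
         pvVal V P - Nat.sqrt (pvVal V P) * Nat.sqrt (pvVal V P),
         (Nat.digits 10 (Nat.sqrt (pvVal V P))).sum,
         e + P.length) := by
  induction P with
  | nil => intro V e _ _; simp [pvVal]
  | cons p P ih =>
    intro V e hmem hlen
    have hp : p < 100 := hmem p List.mem_cons_self
    rw [List.foldl_cons, pv_step_spec V p _ e hp]
    have he : e < 100 := by simp at hlen; omega
    rw [if_pos he]
    have hstep := pv_sqrt_step V p hp
    have hg9 : pvFindX (Nat.sqrt V) ((V - Nat.sqrt V * Nat.sqrt V) * 100 + p) 9 ≤ 9 :=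
      pv_findX_le _ _ 9
    have hsum : (Nat.digits 10 (Nat.sqrt V)).sum + (Nat.sqrt (V * 100 + p) - 10 * Nat.sqrt V)
        = (Nat.digits 10 (Nat.sqrt (V * 100 + p))).sum := by
      rw [hstep]
      rw [pv_digitSum_10mul_add (Nat.sqrt V) _ (by omega)]
      omega
    rw [hsum]
    have := ih (V * 100 + p) (e + 1) (fun q hq => hmem q (List.mem_cons_of_mem p hq)) (by simp at hlen ⊢; omega)
    rw [this]
    have hval : pvVal (V * 100 + p) P = pvVal V (p :: P) := rfl
    rw [hval]
    simp only [List.length_cons]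
    have he2 : e + 1 + P.length = e + (P.length + 1) := by omega
    rw [he2]

theorem pv_fracLoop_char (k : Nat) : ∀ (V e : Nat), e + k = 100 →
    pvFracLoop (Nat.sqrt V) (V - Nat.sqrt V * Nat.sqrt V) ((Nat.digits 10 (Nat.sqrt V)).sum) e
      = (Nat.digits 10 (Nat.sqrt (V * 100 ^ k))).sum := by
  induction k with
  | zero =>
    intro V e he
    rw [pvFracLoop, if_neg (by omega)]
    norm_num
  | succ k ih =>
    intro V e he
    have he100 : e < 100 := by omega
    rw [pvFracLoop, if_pos he100]
    have hstep := pv_step_spec V 0 ((Nat.digits 10 (Nat.sqrt V)).sum) e (by norm_num)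
    have h1 := congrArg (fun q : Nat × Nat × Nat × Nat => q.1) hstep
    have h2 := congrArg (fun q : Nat × Nat × Nat × Nat => q.2.1) hstep
    have h3 := congrArg (fun q : Nat × Nat × Nat × Nat => q.2.2.1) hstep
    simp only [pvStep, Nat.add_zero] at h1 h2 h3
    rw [if_pos he100] at h3
    show pvFracLoop
        (Nat.sqrt V * 10 + pvFindX (Nat.sqrt V) ((V - Nat.sqrt V * Nat.sqrt V) * 100) 9)
        ((V - Nat.sqrt V * Nat.sqrt V) * 100
          - (20 * Nat.sqrt V + pvFindX (Nat.sqrt V) ((V - Nat.sqrt V * Nat.sqrt V) * 100) 9)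
            * pvFindX (Nat.sqrt V) ((V - Nat.sqrt V * Nat.sqrt V) * 100) 9)
        ((Nat.digits 10 (Nat.sqrt V)).sum
          + pvFindX (Nat.sqrt V) ((V - Nat.sqrt V * Nat.sqrt V) * 100) 9)
        (e + 1) = _
    rw [h1, h2, h3]
    have hg9 : pvFindX (Nat.sqrt V) ((V - Nat.sqrt V * Nat.sqrt V) * 100) 9 ≤ 9 :=
      pv_findX_le _ _ 9
    have hs0 := pv_sqrt_step V 0 (by norm_num)
    rw [Nat.add_zero] at hs0
    have hsum : (Nat.digits 10 (Nat.sqrt V)).sum + (Nat.sqrt (V * 100) - 10 * Nat.sqrt V)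
        = (Nat.digits 10 (Nat.sqrt (V * 100))).sum := by
      rw [hs0, pv_digitSum_10mul_add (Nat.sqrt V) _ (by omega)]
      omega
    rw [hsum, if_pos he100, ih (V * 100) (e + 1) (by omega)]
    have hpow : V * 100 * 100 ^ k = V * 100 ^ (k + 1) := by ring
    rw [hpow]

-- ---------- bridging the two sides ----------

theorem pv_pairs_len_eq (N : Nat) (hN : 0 < N) :
    (Nat.digits 100 N).length = (Nat.digits 10 (Nat.sqrt N)).length := by
  have hs : 0 < Nat.sqrt N := Nat.sqrt_pos.2 hN
  have e1 : (Nat.digits 100 N).length = Nat.log 100 N + 1 :=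
    Nat.length_digits 100 N (by norm_num) (by omega)
  have e2 : (Nat.digits 10 (Nat.sqrt N)).length = Nat.log 10 (Nat.sqrt N) + 1 :=
    Nat.length_digits 10 _ (by norm_num) (by omega)
  have h1 : 100 ^ Nat.log 100 N ≤ N := Nat.pow_log_le_self 100 (by omega)
  have h2 : N < 100 ^ (Nat.log 100 N + 1) := Nat.lt_pow_succ_log_self (by norm_num) N
  have hle : 10 ^ Nat.log 100 N ≤ Nat.sqrt N := by
    rw [Nat.le_sqrt]
    calc 10 ^ Nat.log 100 N * 10 ^ Nat.log 100 N = 100 ^ Nat.log 100 N := by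
          rw [← mul_pow]; norm_num
      _ ≤ N := h1
  have hlt : Nat.sqrt N < 10 ^ (Nat.log 100 N + 1) := by
    rw [Nat.sqrt_lt]
    calc N < 100 ^ (Nat.log 100 N + 1) := h2
      _ = 10 ^ (Nat.log 100 N + 1) * 10 ^ (Nat.log 100 N + 1) := by rw [← mul_pow]; norm_num
  have : Nat.log 10 (Nat.sqrt N) = Nat.log 100 N := Nat.log_eq_of_pow_le_of_lt_pow hle hlt
  omega

theorem pv_B_eval (n : Int) (h0 : 0 ≤ n) (hsize : n.toNat < 100 ^ 5) :
    digital_sum_for_sqrt_alt n =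
      if Nat.sqrt n.toNat * Nat.sqrt n.toNat = n.toNat then 0
      else ((Nat.digits 10 (Nat.sqrt (n.toNat * 100 ^ (100 - (Nat.digits 100 n.toNat).length)))).sum : Int) := by
  rw [digital_sum_for_sqrt_alt, if_neg (by omega : ¬ n < 0)]
  by_cases hz : n.toNat = 0
  · simp only [hz]
    rw [pvPairsLE]
    norm_num [pvStep, pvFindX]
  · simp only [pv_pairsLE_eq]
    rw [if_neg (by simp [Nat.digits_ne_nil_iff_ne_zero, hz] :
      ¬ ((Nat.digits 100 n.toNat).reverse = ([] : List Nat)))]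
    have hlen5 : (Nat.digits 100 n.toNat).length ≤ 5 := by
      rw [Nat.length_digits 100 _ (by norm_num) hz]
      have : Nat.log 100 n.toNat < 5 := Nat.log_lt_of_lt_pow hz hsize
      omega
    have hmem : ∀ p ∈ (Nat.digits 100 n.toNat).reverse, p < 100 := by
      intro p hp
      exact Nat.digits_lt_base (by norm_num) (List.mem_reverse.1 hp)
    have hfold := pv_fold_char ((Nat.digits 100 n.toNat).reverse) 0 0 hmem
      (by simp only [List.length_reverse, Nat.zero_add]; omega)
    rw [pv_val_digits] at hfold
    have hinit : ((0, 0, 0, 0) : Nat × Nat × Nat × Nat)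
        = (Nat.sqrt 0, 0 - Nat.sqrt 0 * Nat.sqrt 0, (Nat.digits 10 (Nat.sqrt 0)).sum, 0) := by
      norm_num
    rw [hinit, hfold]
    have hle := Nat.sqrt_le n.toNat
    by_cases hsq : Nat.sqrt n.toNat * Nat.sqrt n.toNat = n.toNat
    · show (if n.toNat - Nat.sqrt n.toNat * Nat.sqrt n.toNat = 0 then (0:Int) else _) = _
      rw [if_pos (by omega), if_pos hsq]
    · show (if n.toNat - Nat.sqrt n.toNat * Nat.sqrt n.toNat = 0 then (0:Int) else _) = _
      rw [if_neg (by omega), if_neg hsq]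
      have hfrac := pv_fracLoop_char (100 - (Nat.digits 100 n.toNat).length) n.toNat
        ((Nat.digits 100 n.toNat).length) (by omega)
      show ((pvFracLoop (Nat.sqrt n.toNat) (n.toNat - Nat.sqrt n.toNat * Nat.sqrt n.toNat)
          ((Nat.digits 10 (Nat.sqrt n.toNat)).sum)
          (0 + (Nat.digits 100 n.toNat).reverse.length) : Nat) : Int) = _
      rw [List.length_reverse, Nat.zero_add, hfrac]

theorem pv_A_eval (n : Int) (h0 : 0 ≤ n) (hsize : n.toNat ≤ 2147483648) :
    digital_sum_for_sqrt n =
      if Nat.sqrt n.toNat * Nat.sqrt n.toNat = n.toNat then 0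
      else ((Nat.digits 10 (Nat.sqrt (n.toNat * 100 ^ (100 - (Nat.digits 10 (Nat.sqrt n.toNat)).length)))).sum : Int) := by
  have hn : ((n.toNat : Nat) : Int) = n := Int.toNat_of_nonneg h0
  simp only [digital_sum_for_sqrt]
  rw [pv_integer_sqrt_eq n h0]
  by_cases hsq : Nat.sqrt n.toNat * Nat.sqrt n.toNat = n.toNat
  · have hcond : ((Nat.sqrt n.toNat : Nat) : Int) * ((Nat.sqrt n.toNat : Nat) : Int) = n := by
      have h2 := congrArg (fun m : Nat => (m : Int)) hsq
      push_cast at h2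
      rw [hn] at h2
      exact h2
    rw [if_pos hcond, if_pos hsq]
  · have hcond : ¬ (((Nat.sqrt n.toNat : Nat) : Int) * ((Nat.sqrt n.toNat : Nat) : Int) = n) := by
      intro h
      apply hsq
      rw [← hn] at h
      exact_mod_cast h
    rw [if_neg hcond, if_neg hsq]
    -- abbreviations
    have hn2 : 2 ≤ n.toNat := by
      rcases (by omega : n.toNat = 0 ∨ n.toNat = 1 ∨ 2 ≤ n.toNat) with h | h | h
      · rw [h] at hsq; simp at hsq
      · rw [h] at hsq; simp at hsq
      · exact h
    have hs1 : 1 ≤ Nat.sqrt n.toNat := Nat.sqrt_pos.2 (by omega)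
    have hs46 : Nat.sqrt n.toNat ≤ 46340 := by
      have : Nat.sqrt n.toNat < 46341 := Nat.sqrt_lt.2 (by omega)
      omega
    set N := n.toNat with hNdef
    set s := Nat.sqrt N with hsdef
    set T : Nat := 10 ^ 100 with hTdef
    set M := N * (T * T) with hMdef
    set SR := Nat.sqrt M with hSRdef
    clear_value T M SR
    -- the scaled Newton call
    have hcast : n * pvSCALE * pvSCALE = ((M : Nat) : Int) := by
      rw [pvSCALE, hMdef, hTdef]
      push_cast
      rw [hn]
      ring
    rw [hcast, pv_integer_sqrt_eq _ (Int.natCast_nonneg M), Int.toNat_natCast]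
    have hTc : pvSCALE = ((T : Nat) : Int) := by rw [pvSCALE, hTdef]; push_cast
    rw [hTc, PySem.Int.floordiv_natCast, PySem.Int.mod_natCast, ← hSRdef]
    have hT0 : 0 < T := by rw [hTdef]; positivity
    have hip : SR / T = s := by
      rw [hSRdef, pv_sqrt_div M T hT0, hMdef,
        Nat.mul_div_cancel _ (by positivity : 0 < T * T)]
    rw [hip]
    set fp := SR % T with hfpdef
    have hfp_lt : fp < T := Nat.mod_lt _ hT0
    have hdecomp : SR = s * T + fp := by
      calc SR = T * (SR / T) + SR % T := (Nat.div_add_mod SR T).symm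
        _ = s * T + fp := by rw [hip, ← hfpdef]; ring
    have hsqlt : s * s < N := lt_of_le_of_ne (Nat.sqrt_le N) hsq
    have hfp1 : 1 ≤ fp := by
      rcases Nat.eq_zero_or_pos fp with hfz | hfz
      · exfalso
        have hub := Nat.lt_succ_sqrt M
        rw [← hSRdef, hdecomp, hfz, Nat.add_zero] at hub
        have hlb : (s * s + 1) * (T * T) ≤ M := by
          rw [hMdef]
          exact Nat.mul_le_mul_right _ (by omega)
        have e1 : (s * T + 1).succ * (s * T + 1).succ
            = (s * s) * (T * T) + 2 * (s * T) + (2 * (s * T) + 4) := by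
          show (s * T + 2) * (s * T + 2) = _
          ring
        have e2 : (s * s + 1) * (T * T) = (s * s) * (T * T) + T * T := by ring
        have h2sT : 4 * (s * T) + 4 < T * T := by
          have hsT : 4 * s + 4 < T := by
            have h6 : (10 : Nat) ^ 6 ≤ T := by
              rw [hTdef]
              exact Nat.pow_le_pow_right (by norm_num) (by norm_num)
            have h7 : (4 * 46340 + 4 : Nat) < 10 ^ 6 := by norm_num
            omega
          calc 4 * (s * T) + 4 = (4 * s) * T + 4 := by ring
            _ < (4 * s) * T + T := by omega
            _ = (4 * s + 1) * T := by ring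
            _ ≤ T * T := Nat.mul_le_mul_right T (by omega)
        have hub' : M < (s * T + 1).succ * (s * T + 1).succ := by
          calc M < (s * T + 1) * (s * T + 1) := hub
            _ ≤ (s * T + 1).succ * (s * T + 1).succ :=
              Nat.mul_le_mul (Nat.le_succ _) (Nat.le_succ _)
        rw [e1] at hub'
        rw [e2] at hlb
        omega
      · exact hfz
    set d := (Nat.digits 10 s).length with hddef
    set LF := (Nat.digits 10 fp).length with hLFdef
    have hd5 : d ≤ 5 := by
      rw [hddef]
      exact pv_len_digits_le s 5 (by omega)
    have hLF100 : LF ≤ 100 := by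
      rw [hLFdef]
      exact pv_len_digits_le fp 100 (by rw [← hTdef]; exact hfp_lt)
    -- strings become digit lists
    rw [pv_toChars_natCast s (by omega), pv_toChars_natCast fp (by omega), pvRjust]
    simp only [List.length_reverse, List.length_map, ← hLFdef]
    rw [show (100 : Int) = ((100 : Nat) : Int) by norm_num, PySem.List.slice_to_natCast]
    rw [PySem.List.foldl_add, zero_add, List.take_append,
      List.take_of_length_le (by rw [List.length_reverse, List.length_map, ← hddef]; omega :
        ((Nat.digits 10 s).map Nat.digitChar).reverse.length ≤ 100)]
    rw [List.length_reverse, List.length_map, ← hddef]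
    rw [List.map_append, List.sum_append, pv_charsum s]
    -- the common right-hand side facts
    have hT2 : T = 10 ^ d * 10 ^ (100 - d) := by rw [hTdef, ← pow_add]; congr 1; omega
    have hQ : Nat.sqrt (N * 100 ^ (100 - d)) = s * 10 ^ (100 - d) + fp / 10 ^ d := by
      have h100 : (100 : Nat) ^ (100 - d) = 10 ^ (100 - d) * 10 ^ (100 - d) := by
        rw [show (100 : Nat) = 10 * 10 by norm_num, mul_pow]
      have harg : N * 100 ^ (100 - d) = M / (10 ^ d * 10 ^ d) := by
        have hM2 : M = (N * (10 ^ (100 - d) * 10 ^ (100 - d))) * (10 ^ d * 10 ^ d) := by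
          rw [hMdef, hT2]; ring
        rw [hM2, Nat.mul_div_cancel _ (by positivity : 0 < 10 ^ d * 10 ^ d), h100]
      rw [harg, ← pv_sqrt_div M (10 ^ d) (by positivity), ← hSRdef, hdecomp, hT2]
      have hre : s * (10 ^ d * 10 ^ (100 - d)) + fp = fp + 10 ^ d * (s * 10 ^ (100 - d)) := by
        ring
      rw [hre, Nat.add_mul_div_left _ _ (by positivity : (0:Nat) < 10 ^ d)]
      omega
    have hfrac_lt : fp / 10 ^ d < 10 ^ (100 - d) := by
      rw [Nat.div_lt_iff_lt_mul (by positivity : (0:Nat) < 10 ^ d)]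
      calc fp < T := hfp_lt
        _ = 10 ^ (100 - d) * 10 ^ d := by rw [hT2]; ring
    have hsplit : (Nat.digits 10 (s * 10 ^ (100 - d) + fp / 10 ^ d)).sum
        = (Nat.digits 10 s).sum + (Nat.digits 10 (fp / 10 ^ d)).sum := by
      have hL' : (Nat.digits 10 (fp / 10 ^ d)).length ≤ 100 - d :=
        pv_len_digits_le _ _ hfrac_lt
      have happ := Nat.digits_append_zeroes_append_digits (b := 10)
        (k := (100 - d) - (Nat.digits 10 (fp / 10 ^ d)).length) (m := s) (n := fp / 10 ^ d)
        (by norm_num) (by omega)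
      have harg2 : fp / 10 ^ d
          + 10 ^ ((Nat.digits 10 (fp / 10 ^ d)).length
              + ((100 - d) - (Nat.digits 10 (fp / 10 ^ d)).length)) * s
          = s * 10 ^ (100 - d) + fp / 10 ^ d := by
        rw [show (Nat.digits 10 (fp / 10 ^ d)).length
            + ((100 - d) - (Nat.digits 10 (fp / 10 ^ d)).length) = 100 - d by omega]
        ring
      rw [harg2] at happ
      rw [← happ]
      simp [List.sum_append, List.sum_replicate]
      omega
    -- the tail of the 100-character window
    rw [List.take_append, List.length_replicate, List.take_replicate]
    rcases Nat.lt_or_ge d LF with hcase | hcase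
    · have h1 : (100 - d) - (100 - LF) = LF - d := by omega
      have h2 : min (100 - d) (100 - LF) = 100 - LF := by omega
      rw [h1, h2, List.take_reverse, List.length_map, ← hLFdef,
        show LF - (LF - d) = d by omega, ← List.map_drop, pv_digits_drop]
      rw [List.map_append, List.sum_append, List.map_replicate, pv_charsum (fp / 10 ^ d)]
      rw [hQ, hsplit]
      push_cast
      norm_num

    · have h1 : (100 - d) - (100 - LF) = 0 := by omega
      have h2 : min (100 - d) (100 - LF) = 100 - d := by omega
      rw [h1, h2, List.take_zero, List.append_nil]
      have h3 : fp / 10 ^ d = 0 := by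
        apply Nat.div_eq_of_lt
        calc fp < 10 ^ LF := by rw [hLFdef]; exact Nat.lt_base_pow_length_digits (by norm_num)
          _ ≤ 10 ^ d := Nat.pow_le_pow_right (by norm_num) hcase
      rw [hQ, hsplit, h3, List.map_replicate]
      norm_num
      exact Or.inr (by decide)

-- ===== VERDICT (by name: the statement is the Claim_ definition above) =====
theorem digital_sum_for_sqrt_spec : Claim_equal_digital_sum_for_sqrt := by
  intro n hdom hpre
  unfold Spec_digital_sum_for_sqrt
  have h0 : 0 ≤ n := hpre
  have hsize : n.toNat ≤ 2147483648 := by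
    unfold Dom_digital_sum_for_sqrt pvDomInt at hdom
    simp only [decide_eq_true_eq] at hdom
    omega
  have hsize' : n.toNat < 100 ^ 5 := by
    have : (100 : Nat) ^ 5 = 10000000000 := by norm_num
    omega
  rw [pv_A_eval n h0 hsize, pv_B_eval n h0 hsize']
  by_cases hsq : Nat.sqrt n.toNat * Nat.sqrt n.toNat = n.toNat
  · rw [if_pos hsq, if_pos hsq]
  · rw [if_neg hsq, if_neg hsq]
    have hz : 0 < n.toNat := by
      rcases Nat.eq_zero_or_pos n.toNat with h | h
      · exfalso; rw [h] at hsq; simp at hsq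
      · exact h
    rw [pv_pairs_len_eq n.toNat hz]
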